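-- pv_equiv track=rewrite | github.com/baptistehun/PersoPython | Cycling_map.py | list_len_sync
-- ===== SOURCE A (Python) =====
-- def list_len_sync(list1, list2):
--     """
--     :param list1: liste1 en entrée
--     :param list2: liste2 en entrée
--     :return: liste1 et liste2 de la même longueur. La longueur finale est la longueur initiale la plus petite
--     """
--     if len(list1) != len(list2):
--         dif = len(list1) - len(list2)
--         if dif > 0:
--             for i in range(dif):
--                 list1.pop()
--         elif dif < 0:
--             for i in range(abs(dif)):
--                 list2.pop()
--     return list1, list2
-- ===== SOURCE B (Python) =====
-- def list_len_sync(list1, list2):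
--     m = min(len(list1), len(list2))
--     del list1[m:]
--     del list2[m:]
--     return list1, list2
-- ===== Notes on version B (the rewrite author's own statement) =====
-- stated objective: simpler
-- what changed: Computes m = min(len1, len2) once and truncates both lists in place with del slicing, removing the signed-difference computation, the if/elif sign branch, and the element-by-element pop loop.
import Mathlib
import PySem

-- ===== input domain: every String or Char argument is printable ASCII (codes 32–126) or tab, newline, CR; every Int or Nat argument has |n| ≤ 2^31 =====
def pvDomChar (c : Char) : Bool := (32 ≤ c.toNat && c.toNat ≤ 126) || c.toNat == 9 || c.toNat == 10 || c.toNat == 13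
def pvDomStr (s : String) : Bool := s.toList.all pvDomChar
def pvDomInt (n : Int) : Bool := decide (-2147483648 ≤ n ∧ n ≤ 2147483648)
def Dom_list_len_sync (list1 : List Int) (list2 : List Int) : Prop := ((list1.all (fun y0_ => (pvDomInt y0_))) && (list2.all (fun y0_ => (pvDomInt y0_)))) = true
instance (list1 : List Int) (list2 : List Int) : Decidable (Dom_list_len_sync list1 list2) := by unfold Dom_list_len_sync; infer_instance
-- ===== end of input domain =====

-- B truncates both lists to m = min(len1, len2) with one unconditional slice-delete each,
-- dropping A's signed-difference and sign-branch pop loops (objective: simpler).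
-- A mutates its arguments in place; equivalence here is about the return value only
-- (B performs the same in-place truncation in Python).


-- ===== PORT A =====
-- `for i in range(k): xs.pop()` : k successive pops of the last element
def pvPopN (k : Nat) (xs : List Int) : List Int :=
  match k with
  | 0 => xs
  | k + 1 => pvPopN k xs.dropLast

def list_len_sync (list1 : List Int) (list2 : List Int) : List Int × List Int :=
  if list1.length ≠ list2.length then
    let dif : Int := (list1.length : Int) - (list2.length : Int)
    if dif > 0 then (pvPopN dif.toNat list1, list2)
    else if dif < 0 then (list1, pvPopN dif.natAbs list2)
    else (list1, list2)
  else (list1, list2)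

-- ===== PORT B =====
def list_len_sync_alt (list1 : List Int) (list2 : List Int) : List Int × List Int :=
  let m := min list1.length list2.length
  (list1.take m, list2.take m)

-- ===== PRECONDITION & SPEC =====
def Spec_list_len_sync (list1 : List Int) (list2 : List Int) (out : List Int × List Int) : Prop := out = list_len_sync_alt list1 list2
instance (list1 : List Int) (list2 : List Int) (out : List Int × List Int) : Decidable (Spec_list_len_sync list1 list2 out) := by unfold Spec_list_len_sync; infer_instance

-- ===== CLAIM (what is proved, stated in full; the proofs are below) =====
def Claim_equal_list_len_sync : Prop := ∀ (list1 : List Int) (list2 : List Int), Dom_list_len_sync list1 list2 → Spec_list_len_sync list1 list2 (list_len_sync list1 list2)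

-- ===== LEMMAS AND PROOFS =====
theorem pvPopN_eq_take (k : Nat) (xs : List Int) :
    pvPopN k xs = xs.take (xs.length - k) := by
  induction k generalizing xs with
  | zero => simp [pvPopN]
  | succ k ih =>
      rw [pvPopN, ih, List.dropLast_eq_take, List.take_take, List.length_take]
      congr 1
      omega

-- ===== VERDICT (by name: the statement is the Claim_ definition above) =====
theorem list_len_sync_spec : Claim_equal_list_len_sync := by
  intro list1 list2 _
  unfold Spec_list_len_sync list_len_sync list_len_sync_alt
  by_cases h : list1.length = list2.length
  · simp [h, List.take_length]
  · simp only [if_pos h]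
    rcases Nat.lt_or_ge list1.length list2.length with hlt | hge
    · have h1 : ¬ ((list1.length : Int) - (list2.length : Int) > 0) := by omega
      have h2 : (list1.length : Int) - (list2.length : Int) < 0 := by omega
      simp only [if_neg h1, if_pos h2]
      have : ((list1.length : Int) - (list2.length : Int)).natAbs
          = list2.length - list1.length := by omega
      rw [this]
      have hm : min list1.length list2.length = list1.length := by omega
      rw [pvPopN_eq_take, hm, List.take_length]
      congr 2
      omega
    · have h1 : (list1.length : Int) - (list2.length : Int) > 0 := by
        have : list1.length ≠ list2.length := h
        omega
      simp only [if_pos h1]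
      have : ((list1.length : Int) - (list2.length : Int)).toNat
          = list1.length - list2.length := by omega
      rw [this]
      have hm : min list1.length list2.length = list2.length := by omega
      rw [pvPopN_eq_take, hm, List.take_length]
      congr 2
      omega
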